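-- pv_equiv track=rewrite | github.com/simple0710/BOJ | silver/[15903] 카드 합체 놀이.py | solution
-- ===== SOURCE A (Python) =====
-- import sys, heapq
--
-- def solution(M, card):
--   heapq.heapify(card) # 리스트 -> heapq 변환
--   for _ in range(M):
--     v = 0
--     for _ in range(2): # 가장 작은 두 카드의 더한 값 계산
--       v += heapq.heappop(card)
--     for _ in range(2): # 덮어 씌우기
--       heapq.heappush(card, v)
--   return sum(card) # 모든 카드의 합 반환
-- ===== SOURCE B (Python) =====
-- def _bisect_right(a, x):
--     # hand-written bisect_right (bisect module not imported by the original)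
--     lo, hi = 0, len(a)
--     while lo < hi:
--         mid = (lo + hi) // 2
--         if x < a[mid]:
--             hi = mid
--         else:
--             lo = mid + 1
--     return lo
--
-- def solution(M, card):
--     # Keep the cards as a fully sorted list instead of a heap: the two smallest
--     # are always at the front; the merged value goes back in by binary-search
--     # insertion. Mutates card like A does (different final layout, same return).
--     card.sort()
--     for _ in range(M):
--         v = card.pop(0) + card.pop(0)
--         for _ in range(2):
--             card.insert(_bisect_right(card, v), v)
--     return sum(card)
-- ===== Notes on version B (the rewrite author's own statement) =====
-- stated objective: alternative
-- what changed: Replaces the binary heap by a fully sorted array: sort once, take the two smallest off the front each round, and re-insert the merged value with a hand-written binary search instead of heap sift operations.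
import Mathlib
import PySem

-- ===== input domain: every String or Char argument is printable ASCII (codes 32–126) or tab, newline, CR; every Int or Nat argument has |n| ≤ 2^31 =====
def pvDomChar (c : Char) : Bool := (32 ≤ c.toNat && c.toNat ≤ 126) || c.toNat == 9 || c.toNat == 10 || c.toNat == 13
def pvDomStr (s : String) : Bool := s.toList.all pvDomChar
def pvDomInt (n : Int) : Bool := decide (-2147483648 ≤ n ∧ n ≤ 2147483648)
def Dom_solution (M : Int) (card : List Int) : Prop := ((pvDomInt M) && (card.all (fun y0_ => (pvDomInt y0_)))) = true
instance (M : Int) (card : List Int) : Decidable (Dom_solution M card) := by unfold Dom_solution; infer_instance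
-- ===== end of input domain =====

-- B replaces the heap by a sorted array with binary-search insertion; equal RETURN value is proved
-- (both Pythons mutate `card` in place, A into heap layout, B into sorted layout — only the return is claimed).

-- ===== PORT A =====
-- heapq is modeled by its value semantics: heappop returns the heap's minimum (the root) and removes
-- that occurrence, heappush adds the element. The popped values and the final sum — everything A
-- observes — are layout-independent, so this is exact for A's return value on every admitted input.
def heapPop? (h : List Int) : Option (Int × List Int) :=
  match PySem.List.min? h (fun x => x) with
  | none => none                                   -- heappop of an empty heap: IndexError
  | some m => some (m, (PySem.List.remove? h m).getD h)

def heapPush (h : List Int) (v : Int) : List Int := h ++ [v]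

def solLoopA : Nat → List Int → List Int
  | 0, h => h
  | n+1, h =>
    match heapPop? h with
    | none => h
    | some (x1, h1) =>
      match heapPop? h1 with
      | none => h1
      | some (x2, h2) =>
        let v := 0 + x1 + x2
        solLoopA n (heapPush (heapPush h2 v) v)

def solution (M : Int) (card : List Int) : Int := (solLoopA M.toNat card).sum

-- ===== PORT B =====
-- _bisect_right's while-loop, fuel = hi - lo bounded by a.length
def brGo (a : List Int) (x : Int) : Nat → Nat → Nat → Nat
  | 0, lo, _ => lo
  | fuel+1, lo, hi =>
    if lo < hi then
      let mid := (lo + hi) / 2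
      if x < a.getD mid 0 then brGo a x fuel lo mid
      else brGo a x fuel (mid+1) hi
    else lo

def bisectR (a : List Int) (x : Int) : Nat := brGo a x a.length 0 a.length

def insortB (a : List Int) (v : Int) : List Int := PySem.List.insert a (bisectR a v : Int) v

def solLoopB : Nat → List Int → List Int
  | 0, s => s
  | n+1, s =>
    match PySem.List.pop? s 0 with
    | none => s
    | some (x1, s1) =>
      match PySem.List.pop? s1 0 with
      | none => s1
      | some (x2, s2) => solLoopB n (insortB (insortB s2 (x1 + x2)) (x1 + x2))

def solution_alt (M : Int) (card : List Int) : Int :=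
  (solLoopB M.toNat (PySem.List.sorted card (fun x => x))).sum

-- ===== PRECONDITION & SPEC =====
-- Pre_ excludes exactly the inputs where A raises IndexError: M ≥ 1 with fewer than two cards
-- (heappop from a list that runs empty); B raises there too (pop from empty list).
def Pre_solution (M : Int) (card : List Int) : Prop := M ≤ 0 ∨ 2 ≤ card.length
instance (M : Int) (card : List Int) : Decidable (Pre_solution M card) := by unfold Pre_solution; infer_instance

def pvWitness_solution : Int × List Int := (3, [3, 2, 6, 1, 4])

def Spec_solution (M : Int) (card : List Int) (out : Int) : Prop := out = solution_alt M card
instance (M : Int) (card : List Int) (out : Int) : Decidable (Spec_solution M card out) := by unfold Spec_solution; infer_instance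

-- ===== CLAIM (what is proved, stated in full; the proofs are below) =====
def Claim_equal_solution : Prop := ∀ (M : Int) (card : List Int), Dom_solution M card → Pre_solution M card → Spec_solution M card (solution M card)

-- ===== LEMMAS AND PROOFS =====

-- the binary-search loop returns a valid right-insertion point in a sorted list
theorem brGo_spec (a : List Int) (x : Int) (fuel lo hi : Nat)
    (hsort : a.Pairwise (· ≤ ·)) (hlh : lo ≤ hi) (hha : hi ≤ a.length) (hfuel : hi - lo ≤ fuel)
    (hlow : ∀ j, j < lo → ∀ hj : j < a.length, a[j] ≤ x)
    (hhigh : ∀ j, hi ≤ j → ∀ hj : j < a.length, x < a[j]) :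
    brGo a x fuel lo hi ≤ a.length ∧
      (∀ j, ∀ hj : j < a.length, j < brGo a x fuel lo hi → a[j] ≤ x) ∧
      (∀ j, ∀ hj : j < a.length, brGo a x fuel lo hi ≤ j → x < a[j]) := by
  induction fuel generalizing lo hi with
  | zero =>
    have : lo = hi := by omega
    subst this
    simp only [brGo]
    exact ⟨by omega, fun j hj hjlo => hlow j hjlo hj, fun j hj hjlo => hhigh j hjlo hj⟩
  | succ fuel ih =>
    have hmono : ∀ i j : Nat, ∀ hi' : i < a.length, ∀ hj : j < a.length, i ≤ j → a[i] ≤ a[j] := by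
      intro i j hi' hj hij
      rcases Nat.lt_or_eq_of_le hij with hlt | heq
      · exact List.pairwise_iff_getElem.mp hsort i j hi' hj hlt
      · subst heq; exact le_refl _
    simp only [brGo]
    by_cases hc : lo < hi
    · simp only [hc, if_true]
      have hmid : (lo + hi) / 2 < a.length := by omega
      have hget : a.getD ((lo + hi) / 2) 0 = a[(lo + hi) / 2] := List.getD_eq_getElem a 0 hmid
      by_cases hx : x < a.getD ((lo + hi) / 2) 0
      · rw [hget] at hx
        rw [if_pos (hget ▸ hx)]
        exact ih lo ((lo + hi) / 2) (by omega) (by omega) (by omega) hlow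
          (fun j hjlo hj => lt_of_lt_of_le hx (hmono _ j hmid hj hjlo))
      · rw [hget] at hx
        rw [if_neg (hget ▸ hx)]
        exact ih ((lo + hi) / 2 + 1) hi (by omega) hha (by omega)
          (fun j hjlo hj => le_trans (hmono j ((lo + hi) / 2) hj hmid (by omega)) (not_lt.mp hx))
          hhigh
    · simp only [hc, if_false]
      have : lo = hi := by omega
      subst this
      exact ⟨by omega, fun j hj hjlo => hlow j hjlo hj, fun j hj hjlo => hhigh j hjlo hj⟩

theorem bisectR_spec (a : List Int) (x : Int) (hsort : a.Pairwise (· ≤ ·)) :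
    bisectR a x ≤ a.length ∧
      (∀ j, ∀ hj : j < a.length, j < bisectR a x → a[j] ≤ x) ∧
      (∀ j, ∀ hj : j < a.length, bisectR a x ≤ j → x < a[j]) := by
  unfold bisectR
  exact brGo_spec a x a.length 0 a.length hsort (by omega) le_rfl (by omega)
    (fun j hj _ => absurd hj (Nat.not_lt_zero j)) (fun j hj hja => absurd hja (by omega))

theorem insortB_eq (a : List Int) (v : Int) (hsort : a.Pairwise (· ≤ ·)) :
    insortB a v = a.take (bisectR a v) ++ v :: a.drop (bisectR a v) := by
  unfold insortB
  exact PySem.List.insert_natCast a (bisectR a v) v (bisectR_spec a v hsort).1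

theorem insortB_perm (a : List Int) (v : Int) (hsort : a.Pairwise (· ≤ ·)) :
    (insortB a v).Perm (v :: a) := by
  rw [insortB_eq a v hsort]
  have h1 : (a.take (bisectR a v) ++ v :: a.drop (bisectR a v)).Perm
      (v :: (a.take (bisectR a v) ++ a.drop (bisectR a v))) := List.perm_middle
  rwa [List.take_append_drop] at h1

theorem insortB_pairwise (a : List Int) (v : Int) (hsort : a.Pairwise (· ≤ ·)) :
    (insortB a v).Pairwise (· ≤ ·) := by
  obtain ⟨hle, hlow, hhigh⟩ := bisectR_spec a v hsort
  rw [insortB_eq a v hsort]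
  rw [List.pairwise_append]
  refine ⟨hsort.sublist (List.take_sublist (bisectR a v) a), ?_, ?_⟩
  · rw [List.pairwise_cons]
    refine ⟨?_, hsort.sublist (List.drop_sublist (bisectR a v) a)⟩
    intro y hy
    obtain ⟨j, hj, rfl⟩ := List.getElem_of_mem hy
    have hj' : bisectR a v + j < a.length := by
      rw [List.length_drop] at hj; omega
    rw [List.getElem_drop]
    exact le_of_lt (hhigh (bisectR a v + j) hj' (by omega))
  · intro p hp q hq
    obtain ⟨i, hi, rfl⟩ := List.getElem_of_mem hp
    have hi' : i < a.length := by
      rw [List.length_take] at hi; omega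
    have hik : i < bisectR a v := by
      rw [List.length_take] at hi; omega
    rw [List.getElem_take]
    have hpv : a[i] ≤ v := hlow i hi' hik
    rcases List.mem_cons.mp hq with rfl | hq'
    · exact hpv
    · obtain ⟨j, hj, rfl⟩ := List.getElem_of_mem hq'
      have hj' : bisectR a v + j < a.length := by
        rw [List.length_drop] at hj; omega
      rw [List.getElem_drop]
      exact le_trans hpv (le_of_lt (hhigh (bisectR a v + j) hj' (by omega)))

-- popping the modeled heap: on a multiset equal to a sorted list a :: r, the pop returns a
theorem heapPop_of_perm (h : List Int) (a : Int) (r : List Int)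
    (hp : h.Perm (a :: r)) (hsort : (a :: r).Pairwise (· ≤ ·)) :
    ∃ h', heapPop? h = some (a, h') ∧ h'.Perm r := by
  have hne : h ≠ [] := by
    intro hnil; subst hnil; exact absurd hp.symm (by simp)
  obtain ⟨m, hm⟩ : ∃ m, PySem.List.min? h (fun x => x) = some m := by
    cases hmm : PySem.List.min? h (fun x => x) with
    | none => exact absurd ((PySem.List.min?_eq_none_iff h (fun x => x)).mp hmm) hne
    | some m => exact ⟨m, rfl⟩
  have hma : m = a := by
    have hmem : m ∈ h := PySem.List.min?_mem hm
    have hamem : a ∈ h := hp.mem_iff.mpr (List.mem_cons_self)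
    have h1 : m ≤ a := PySem.List.min?_isMin hm a hamem
    have h2 : a ≤ m := by
      rcases List.mem_cons.mp (hp.mem_iff.mp hmem) with rfl | hmr
      · exact le_refl _
      · exact (List.pairwise_cons.mp hsort).1 m hmr
    omega
  subst hma
  have hmem : m ∈ h := PySem.List.min?_mem hm
  refine ⟨h.erase m, ?_, ?_⟩
  · simp only [heapPop?, hm, PySem.List.remove?_eq_some_erase h m hmem, Option.getD_some]
  · have := hp.erase m
    rwa [List.erase_cons_head] at this

-- the core invariant: a heap multiset-equal to a sorted list of length ≥ 2 yields the same sum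
theorem loop_sum (n : Nat) (h s : List Int) (hp : h.Perm s)
    (hsort : s.Pairwise (· ≤ ·)) (hlen : 2 ≤ s.length) :
    (solLoopA n h).sum = (solLoopB n s).sum := by
  induction n generalizing h s with
  | zero => simpa [solLoopA, solLoopB] using hp.sum_eq
  | succ n ih =>
    match s, hsort, hlen with
    | a :: b :: t, hsort, _ =>
      obtain ⟨h1, hpop1, hp1⟩ := heapPop_of_perm h a (b :: t) hp hsort
      have hsort1 : (b :: t).Pairwise (· ≤ ·) := (List.pairwise_cons.mp hsort).2
      obtain ⟨h2, hpop2, hp2⟩ := heapPop_of_perm h1 b t hp1 hsort1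
      have hsortt : t.Pairwise (· ≤ ·) := (List.pairwise_cons.mp hsort1).2
      simp only [solLoopA, solLoopB, hpop1, hpop2, PySem.List.pop?_zero_cons, heapPush]
      have hzv : 0 + a + b = a + b := by ring
      rw [hzv]
      set v := a + b with hv
      have hsort' : (insortB (insortB t v) v).Pairwise (· ≤ ·) :=
        insortB_pairwise _ v (insortB_pairwise t v hsortt)
      have hperm' : (h2 ++ [v] ++ [v]).Perm (insortB (insortB t v) v) := by
        have e2 : (insortB t v).Perm (v :: t) := insortB_perm t v hsortt
        have e3 : (insortB (insortB t v) v).Perm (v :: v :: t) :=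
          (insortB_perm _ v (insortB_pairwise t v hsortt)).trans (e2.cons v)
        have e4 : (h2 ++ [v] ++ [v]).Perm (t ++ [v] ++ [v]) :=
          (hp2.append (List.Perm.refl [v])).append (List.Perm.refl [v])
        have e5 : (t ++ [v] ++ [v]).Perm (v :: v :: t) := by
          have heq : t ++ [v] ++ [v] = t ++ [v, v] := by simp
          rw [heq]
          exact List.perm_append_comm
        exact (e4.trans e5).trans e3.symm
      have hlen' : 2 ≤ (insortB (insortB t v) v).length := by
        have l1 : (insortB t v).length = t.length + 1 := by
          simpa using (insortB_perm t v hsortt).length_eq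
        have l2 : (insortB (insortB t v) v).length = (insortB t v).length + 1 := by
          simpa using (insortB_perm _ v (insortB_pairwise t v hsortt)).length_eq
        omega
      exact ih _ _ hperm' hsort' hlen'

-- ===== VERDICT (by name: the statement is the Claim_ definition above) =====
theorem solution_spec : Claim_equal_solution := by
  intro M card _ hpre
  unfold Spec_solution solution solution_alt
  have hperm : card.Perm (PySem.List.sorted card (fun x => x)) :=
    (PySem.List.sorted_perm card (fun x => x) false).symm
  have hsort : (PySem.List.sorted card (fun x => x)).Pairwise (· ≤ ·) :=
    PySem.List.sorted_pairwise card (fun x => x)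
  cases hn : M.toNat with
  | zero => simpa [solLoopA, solLoopB] using hperm.sum_eq
  | succ n =>
    have hlen : 2 ≤ card.length := by
      rcases hpre with hle | hge
      · omega
      · exact hge
    have hlen' : 2 ≤ (PySem.List.sorted card (fun x => x)).length := by
      rwa [hperm.length_eq] at hlen
    exact loop_sum (n + 1) card _ hperm hsort hlen'
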